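-- pv_equiv track=rewrite | github.com/max-i36/DataScience_SnuffelFiets | error_unpacker.py | get_error_array
-- ===== SOURCE A (Python) =====
-- def get_error_array(error_code):
--     if error_code == 0:
--         return None
--     else:
--         error_array = []
--         for i in range(0, 16):
--             if error_code & 2**i != 0:
--                 error_array.append(2**i)
--         return error_array
-- ===== SOURCE B (Python) =====
-- def get_error_array(error_code):
--     if error_code == 0:
--         return None
--     errors = []
--     v = error_code & 0xFFFF
--     while v:
--         low = v & -v          # isolate the lowest set bit
--         errors.append(low)
--         v ^= low              # clear it
--     return errors
-- ===== Notes on version B (the rewrite author's own statement) =====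
-- stated objective: alternative
-- what changed: B iterates over the set bits themselves - masking to the sixteen-bit field once, then repeatedly isolating the lowest set bit with v & -v, appending it, and clearing it with XOR - instead of A's sixteen fixed mask-and-test passes over the bit positions.
import Mathlib
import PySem

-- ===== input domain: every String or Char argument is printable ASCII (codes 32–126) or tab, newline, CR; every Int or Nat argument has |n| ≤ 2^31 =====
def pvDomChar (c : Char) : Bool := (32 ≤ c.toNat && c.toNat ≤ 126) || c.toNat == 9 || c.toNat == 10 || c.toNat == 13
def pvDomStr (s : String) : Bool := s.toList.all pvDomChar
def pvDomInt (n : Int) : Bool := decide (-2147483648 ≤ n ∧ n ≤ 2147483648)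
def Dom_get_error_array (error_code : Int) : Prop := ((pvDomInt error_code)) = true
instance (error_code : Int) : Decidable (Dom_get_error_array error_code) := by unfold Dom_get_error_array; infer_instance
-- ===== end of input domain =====

-- B iterates over the set bits themselves (mask to the sixteen-bit field once, then repeatedly isolate the
-- lowest set bit with v & -v, append it and clear it with XOR) instead of A's sixteen fixed
-- mask-and-test passes (objective: alternative; same results, return value only).

-- ===== PORT A =====
def get_error_array (error_code : Int) : Option (List Int) :=
  if error_code = 0 then
    none
  else
    some ((PySem.List.pyRange 0 16 1).foldl
      (fun error_array i =>
        if PySem.Int.band error_code (2 ^ i.toNat) ≠ 0 then error_array ++ [2 ^ i.toNat]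
        else error_array) [])

-- ===== PORT B =====
-- the while loop of Source B; fuel 16 only makes it total: v starts below 2^16 and each pass
-- clears one set bit, so the Python loop runs at most 16 times
def altLoopB : Nat → Int → List Int → List Int
  | 0, _, errors => errors
  | fuel + 1, v, errors =>
    if v = 0 then errors
    else
      let low := PySem.Int.band v (-v)
      altLoopB fuel (PySem.Int.bxor v low) (errors ++ [low])

def get_error_array_alt (error_code : Int) : Option (List Int) :=
  if error_code = 0 then
    none
  else
    some (altLoopB 16 (PySem.Int.band error_code 65535) [])

-- ===== PRECONDITION & SPEC =====
def Spec_get_error_array (error_code : Int) (out : Option (List Int)) : Prop := out = get_error_array_alt error_code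
instance (error_code : Int) (out : Option (List Int)) : Decidable (Spec_get_error_array error_code out) := by unfold Spec_get_error_array; infer_instance

-- ===== CLAIM (what is proved, stated in full; the proofs are below) =====
def Claim_equal_get_error_array : Prop := ∀ (error_code : Int), Dom_get_error_array error_code → Spec_get_error_array error_code (get_error_array error_code)

-- ===== LEMMAS AND PROOFS =====

-- A's result, reduced to the set bits of n = error_code % 2^16 (proof-side spec)
def fA (n : Nat) : List Int := ((List.range 16).filter n.testBit).map (fun i => ((2 : Int) ^ i))

-- ---- Nat bit identities ----

theorem odd_div_two_eq (m : Nat) (hm : m % 2 = 1) : m / 2 = (m - 1) / 2 := by omega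

theorem odd_pred_testBit (m : Nat) (hm : m % 2 = 1) (j : Nat) (hj : 1 ≤ j) :
    (m - 1).testBit j = m.testBit j := by
  obtain ⟨j', rfl⟩ : ∃ j', j = j' + 1 := ⟨j - 1, by omega⟩
  rw [show j' + 1 = Nat.succ j' from rfl, Nat.testBit_succ, Nat.testBit_succ,
    odd_div_two_eq m hm]

theorem two_mul_and (x : Nat) (hx : 1 ≤ x) : (2 * x) &&& (2 * x - 1) = 2 * (x &&& (x - 1)) := by
  apply Nat.eq_of_testBit_eq
  intro i
  cases i with
  | zero =>
    rw [Nat.testBit_and, Nat.testBit_zero, Nat.testBit_zero, Nat.testBit_zero]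
    have h1 : 2 * x % 2 = 0 := by omega
    have h2 : 2 * (x &&& (x - 1)) % 2 = 0 := by omega
    simp [h1, h2]
  | succ i =>
    rw [Nat.testBit_and, Nat.testBit_succ, Nat.testBit_succ, Nat.testBit_succ,
      show 2 * x / 2 = x from by omega, show (2 * x - 1) / 2 = x - 1 from by omega,
      show 2 * (x &&& (x - 1)) / 2 = x &&& (x - 1) from by omega, Nat.testBit_and]

theorem odd_and_sub_one (m : Nat) (hm : m % 2 = 1) : m &&& (m - 1) = m - 1 := by
  apply Nat.eq_of_testBit_eq
  intro i
  cases i with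
  | zero =>
    rw [Nat.testBit_and, Nat.testBit_zero, Nat.testBit_zero]
    have h2 : (m - 1) % 2 = 0 := by omega
    simp [h2]
  | succ i =>
    rw [Nat.testBit_and, Nat.testBit_succ, Nat.testBit_succ, odd_div_two_eq m hm, Bool.and_self]

theorem and_pred_eq (t m : Nat) (hm : m % 2 = 1) :
    (2 ^ t * m) &&& (2 ^ t * m - 1) = 2 ^ t * (m - 1) := by
  induction t with
  | zero => simpa using odd_and_sub_one m hm
  | succ t ih =>
    have hx : 1 ≤ 2 ^ t * m := by
      have hmp : 0 < m := by omega
      have : 0 < 2 ^ t * m := by positivity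
      omega
    calc (2 ^ (t + 1) * m) &&& (2 ^ (t + 1) * m - 1)
        = (2 * (2 ^ t * m)) &&& (2 * (2 ^ t * m) - 1) := by ring_nf
      _ = 2 * ((2 ^ t * m) &&& (2 ^ t * m - 1)) := two_mul_and _ hx
      _ = 2 * (2 ^ t * (m - 1)) := by rw [ih]
      _ = 2 ^ (t + 1) * (m - 1) := by ring

theorem two_mul_xor (x y : Nat) : (2 * x) ^^^ (2 * y) = 2 * (x ^^^ y) := by
  apply Nat.eq_of_testBit_eq
  intro i
  cases i with
  | zero =>
    rw [Nat.testBit_xor, Nat.testBit_zero, Nat.testBit_zero, Nat.testBit_zero]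
    have h1 : 2 * x % 2 = 0 := by omega
    have h2 : 2 * y % 2 = 0 := by omega
    have h3 : 2 * (x ^^^ y) % 2 = 0 := by omega
    simp [h1, h2, h3]
  | succ i =>
    rw [Nat.testBit_xor, Nat.testBit_succ, Nat.testBit_succ, Nat.testBit_succ,
      show 2 * x / 2 = x from by omega, show 2 * y / 2 = y from by omega,
      show 2 * (x ^^^ y) / 2 = x ^^^ y from by omega, Nat.testBit_xor]

theorem odd_xor_one (m : Nat) (hm : m % 2 = 1) : m ^^^ 1 = m - 1 := by
  apply Nat.eq_of_testBit_eq
  intro i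
  cases i with
  | zero =>
    rw [Nat.testBit_xor, Nat.testBit_zero, Nat.testBit_zero, Nat.testBit_zero]
    have h2 : (m - 1) % 2 = 0 := by omega
    simp [hm, h2]
  | succ i =>
    rw [Nat.testBit_xor, Nat.testBit_succ, Nat.testBit_succ, Nat.testBit_succ,
      show (1 : Nat) / 2 = 0 from rfl, Nat.zero_testBit, odd_div_two_eq m hm, Bool.xor_false]

theorem xor_low (t m : Nat) (hm : m % 2 = 1) : (2 ^ t * m) ^^^ 2 ^ t = 2 ^ t * (m - 1) := by
  induction t with
  | zero => simpa using odd_xor_one m hm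
  | succ t ih =>
    calc (2 ^ (t + 1) * m) ^^^ 2 ^ (t + 1)
        = (2 * (2 ^ t * m)) ^^^ (2 * 2 ^ t) := by ring_nf
      _ = 2 * ((2 ^ t * m) ^^^ 2 ^ t) := two_mul_xor _ _
      _ = 2 * (2 ^ t * (m - 1)) := by rw [ih]
      _ = 2 ^ (t + 1) * (m - 1) := by ring

theorem testBit_pow_mul (t m i : Nat) :
    (2 ^ t * m).testBit i = (decide (t ≤ i) && m.testBit (i - t)) := by
  rw [Nat.mul_comm, Nat.testBit_mul_two_pow]

-- ---- splitting off the lowest set bit from A's filtered range ----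

theorem filter_split (t m : Nat) (hm : m % 2 = 1) (ht : t < 16) :
    (List.range 16).filter (2 ^ t * m).testBit
      = t :: (List.range 16).filter (2 ^ t * (m - 1)).testBit := by
  have hsplit : (16 : Nat) = t + ((15 - t) + 1) := by omega
  rw [hsplit, List.range_add, List.filter_append, List.filter_append]
  have h1 : (List.range t).filter (2 ^ t * m).testBit = [] := by
    apply List.filter_eq_nil_iff.mpr
    intro i hi
    rw [List.mem_range] at hi
    rw [testBit_pow_mul]
    have hti : ¬ t ≤ i := by omega
    simp [hti]
  have h2 : (List.range t).filter (2 ^ t * (m - 1)).testBit = [] := by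
    apply List.filter_eq_nil_iff.mpr
    intro i hi
    rw [List.mem_range] at hi
    rw [testBit_pow_mul]
    have hti : ¬ t ≤ i := by omega
    simp [hti]
  rw [h1, h2, List.nil_append, List.nil_append, List.range_succ_eq_map, List.map_cons,
    List.map_map, List.filter_cons, List.filter_cons]
  have hbt : (2 ^ t * m).testBit t = true := by
    rw [testBit_pow_mul]
    simp [Nat.testBit_zero, hm]
  have hbt' : (2 ^ t * (m - 1)).testBit t = false := by
    rw [testBit_pow_mul]
    have : (m - 1) % 2 = 0 := by omega
    simp [Nat.testBit_zero, this]
  simp only [Nat.add_zero, hbt, hbt', if_true, if_false, Bool.false_eq_true]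
  congr 1
  apply List.filter_congr
  intro y hy
  rw [List.mem_map] at hy
  obtain ⟨x, _, rfl⟩ := hy
  simp only [Function.comp, testBit_pow_mul]
  have harg : t + Nat.succ x - t = x + 1 := by omega
  rw [harg, odd_pred_testBit m hm (x + 1) (by omega)]

theorem fA_split (t m : Nat) (hm : m % 2 = 1) (ht : t < 16) :
    fA (2 ^ t * m) = ((2 ^ t : Nat) : Int) :: fA (2 ^ t * (m - 1)) := by
  unfold fA
  rw [filter_split t m hm ht, List.map_cons]
  norm_num

-- ---- the lowest-set-bit step, on the Int level ----

theorem band_neg_self (n : Nat) (hn : 0 < n) :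
    PySem.Int.band (↑n) (-(↑n : Int)) = ((n - (n &&& (n - 1)) : Nat) : Int) := by
  have hneg : ¬ (0 ≤ -(↑n : Int)) := by omega
  have h1 : (-(-(n : Int)) - 1).toNat = n - 1 := by omega
  rw [PySem.Int.band, if_pos (Int.natCast_nonneg n), if_neg hneg, h1, Int.toNat_natCast]

theorem bxor_natCast' (a b : Nat) :
    PySem.Int.bxor (↑a) (↑b) = ((a ^^^ b : Nat) : Int) := by
  rw [PySem.Int.bxor, if_pos (by positivity), if_pos (by positivity)]
  simp

-- ---- B's loop computes fA ----
-- invariant: all bits below c of n are clear and fuel + c ≥ 16, so the remaining set bits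
-- (at most 16 - c of them) fit in the remaining fuel

theorem altLoopB_eq_fA (fuel : Nat) :
    ∀ (n c : Nat) (acc : List Int), n < 65536 → 2 ^ c ∣ n → 16 ≤ fuel + c →
      altLoopB fuel (↑n) acc = acc ++ fA n := by
  induction fuel with
  | zero =>
    intro n c acc hlt hdvd hfc
    have hn0 : n = 0 := by
      by_contra hne
      have h1 : 2 ^ 16 ≤ 2 ^ c := Nat.pow_le_pow_right (by omega) (by omega)
      have h2 : 2 ^ c ≤ n := Nat.le_of_dvd (by omega) hdvd
      omega
    subst hn0
    simp [altLoopB, fA, Nat.zero_testBit]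
  | succ fuel ih =>
    intro n c acc hlt hdvd hfc
    by_cases hn0 : n = 0
    · subst hn0
      simp [altLoopB, fA, Nat.zero_testBit]
    · obtain ⟨t, m, hm2, hnm⟩ := Nat.exists_eq_pow_mul_and_not_dvd hn0 2 (by omega)
      have hm : m % 2 = 1 := by omega
      have hmpos : 0 < m := by omega
      have hct : c ≤ t := by
        by_contra hgt
        have h1 : 2 ^ (t + 1) ∣ 2 ^ c := Nat.pow_dvd_pow 2 (by omega)
        have h2 : 2 ^ (t + 1) ∣ 2 ^ t * m := h1.trans (hnm ▸ hdvd)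
        have h3 : 2 ^ t * 2 ∣ 2 ^ t * m := by rw [← pow_succ]; exact h2
        have h4 : 2 ∣ m := (mul_dvd_mul_iff_left (a := 2 ^ t) (by positivity)).mp h3
        omega
      have ht16 : t < 16 := by
        have h1 : 2 ^ t ≤ n := by
          rw [hnm]; exact Nat.le_mul_of_pos_right _ hmpos
        have h2 : 2 ^ t < 2 ^ 16 := by omega
        exact (Nat.pow_lt_pow_iff_right (by omega)).mp h2
      rw [altLoopB]
      rw [if_neg (by exact_mod_cast hn0)]
      have hlow : PySem.Int.band (↑n) (-(↑n : Int)) = ((2 ^ t : Nat) : Int) := by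
        rw [band_neg_self n (by omega), hnm, and_pred_eq t m hm]
        congr 1
        calc 2 ^ t * m - 2 ^ t * (m - 1)
            = 2 ^ t * ((m - 1) + 1) - 2 ^ t * (m - 1) := by rw [show (m - 1) + 1 = m from by omega]
          _ = 2 ^ t := by rw [Nat.mul_add]; omega
      simp only [hlow]
      rw [bxor_natCast', hnm, xor_low t m hm]
      rw [ih (2 ^ t * (m - 1)) (t + 1) _
        (by have : 2 ^ t * (m - 1) ≤ 2 ^ t * m := Nat.mul_le_mul_left _ (by omega); omega)
        (by rw [pow_succ]
            exact Nat.mul_dvd_mul (dvd_refl _) (by omega))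
        (by omega)]
      rw [fA_split t m hm ht16]
      simp

-- ---- masking: error_code & 0xFFFF = error_code % 2^16 ----

theorem band_65535 (e : Int) : PySem.Int.band e 65535 = PySem.Int.mod e 65536 := by
  by_cases he : 0 ≤ e
  · obtain ⟨n, rfl⟩ := Int.eq_ofNat_of_zero_le he
    rw [show ((65535 : Int)) = (((65535 : Nat) : Int)) from by norm_num,
      show ((65536 : Int)) = (((65536 : Nat) : Int)) from by norm_num,
      PySem.Int.band_natCast, PySem.Int.mod_natCast]
    congr 1
    have h := Nat.and_two_pow_sub_one_eq_mod n 16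
    norm_num at h
    exact h
  · set n : Nat := (-e - 1).toNat with hn
    have h1 : PySem.Int.band e 65535 = ((65535 - (65535 &&& n) : Nat) : Int) := by
      rw [PySem.Int.band, if_neg (by omega), if_pos (by norm_num)]
      congr 2
    have h2 : (65535 : Nat) &&& n = n % 65536 := by
      rw [Nat.and_comm]
      have h := Nat.and_two_pow_sub_one_eq_mod n 16
      norm_num at h
      exact h
    rw [h1, h2, PySem.Int.mod_eq_emod_of_pos (by norm_num)]
    omega

-- ---- A's bit tests see only the low 16 bits ----

theorem band_mod_pow (e : Int) (i : Nat) (hi : i < 16) :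
    PySem.Int.band (PySem.Int.mod e 65536) (2 ^ i) = PySem.Int.band e (2 ^ i) := by
  have hpow : ((2 : Int) ^ i) = (((2 ^ i : Nat) : Int)) := by push_cast; ring
  by_cases he : 0 ≤ e
  · obtain ⟨n, rfl⟩ := Int.eq_ofNat_of_zero_le he
    have h65536 : ((65536 : Int)) = (((65536 : Nat) : Int)) := by norm_num
    rw [h65536, PySem.Int.mod_natCast, hpow, PySem.Int.band_natCast, PySem.Int.band_natCast]
    congr 1
    have : (65536 : Nat) = 2 ^ 16 := by norm_num
    rw [this, Nat.and_two_pow, Nat.and_two_pow, Nat.testBit_mod_two_pow]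
    simp [hi]
  · replace he : e < 0 := by omega
    set n : Nat := (-e - 1).toNat with hn
    have hm : PySem.Int.mod e 65536 = (((65535 - n % 65536 : Nat) : Int)) := by
      rw [PySem.Int.mod_eq_emod_of_pos (by norm_num)]
      omega
    have hrhs : PySem.Int.band e (2 ^ i)
        = ((2 ^ i - (2 ^ i &&& n) : Nat) : Int) := by
      rw [PySem.Int.band]
      rw [if_neg (by omega), if_pos (by positivity)]
      congr 2
    rw [hm, hrhs, hpow, PySem.Int.band_natCast]
    congr 1
    have hmod_lt : n % 65536 < 2 ^ 16 := by omega
    have hsub : 65535 - n % 65536 = 2 ^ 16 - (n % 65536 + 1) := by omega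
    rw [Nat.and_comm (2 ^ i) n, Nat.and_two_pow, Nat.and_two_pow, hsub,
      Nat.testBit_two_pow_sub_succ hmod_lt]
    have : (65536 : Nat) = 2 ^ 16 := by norm_num
    rw [this, Nat.testBit_mod_two_pow]
    rcases hbit : n.testBit i with _ | _ <;> simp [hi]

-- ===== VERDICT (by name: the statement is the Claim_ definition above) =====
theorem get_error_array_spec : Claim_equal_get_error_array := by
  intro e _
  unfold Spec_get_error_array get_error_array get_error_array_alt
  by_cases he : e = 0
  · simp [he]
  · rw [if_neg he, if_neg he]
    congr 1
    have hm0 : (0 : Int) ≤ PySem.Int.mod e 65536 := PySem.Int.mod_nonneg _ (by norm_num)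
    have hmlt : PySem.Int.mod e 65536 < 65536 := PySem.Int.mod_lt _ (by norm_num)
    set m : Int := PySem.Int.mod e 65536 with hmdef
    set n : Nat := m.toNat with hndef
    have hcast : m = ((n : Nat) : Int) := by omega
    have hnlt : n < 65536 := by omega
    -- B's side: the masked start value is ↑n, then the loop computes fA n
    rw [band_65535, ← hmdef, hcast,
      altLoopB_eq_fA 16 n 0 [] hnlt (by norm_num) (by omega),
      List.nil_append]
    -- A's side: replace the bit tests on e by bit tests on m = e % 65536
    rw [PySem.List.foldl_congr_mem (PySem.List.pyRange 0 16 1)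
      (fun acc i => if PySem.Int.band e (2 ^ i.toNat) ≠ 0 then acc ++ [2 ^ i.toNat] else acc)
      (fun acc i => if PySem.Int.band (↑n) (2 ^ i.toNat) ≠ 0 then acc ++ [2 ^ i.toNat] else acc)
      []
      (by
        intro acc x hx
        dsimp only
        rw [PySem.List.mem_pyRange_one] at hx
        have hxlt : x.toNat < 16 := by omega
        rw [← band_mod_pow e x.toNat hxlt, ← hmdef, hcast])]
    -- Bool form of the loop body, then the filter/map shape of the loop
    rw [show (fun (acc : List Int) (i : Int) =>
          if PySem.Int.band (↑n) (2 ^ i.toNat) ≠ 0 then acc ++ [2 ^ i.toNat] else acc)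
        = (fun acc i =>
          if (fun j : Int => !decide (PySem.Int.band (↑n) (2 ^ j.toNat) = 0)) i = true
          then acc ++ [(fun j : Int => ((2 : Int) ^ j.toNat)) i] else acc) from by
      funext acc i; simp]
    rw [PySem.List.foldl_append_if]
    rw [show PySem.List.pyRange 0 16 1 = (List.range 16).map (fun k : Nat => (k : Int)) from by
      decide]
    rw [List.filter_map, List.map_map]
    have hfilter : ∀ k : Nat,
        ((fun j : Int => !decide (PySem.Int.band (↑n) (2 ^ j.toNat) = 0)) ∘
          (fun k : Nat => (k : Int))) k = n.testBit k := by
      intro k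
      simp only [Function.comp]
      rw [Int.toNat_natCast,
        show ((2 : Int) ^ k) = (((2 ^ k : Nat) : Int)) from by push_cast; ring,
        PySem.Int.band_natCast, Nat.and_two_pow]
      have h2k := Nat.two_pow_pos k
      rcases hbit : n.testBit k with _ | _ <;> simp
    rw [List.filter_congr (fun k _ => hfilter k)]
    unfold fA
    apply List.map_congr_left
    intro k _
    simp
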